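-- pv_equiv track=rewrite | github.com/yeori/py-training | hackerrank/quiz012.py | solve
-- ===== SOURCE A (Python) =====
-- def solve(cubes):
--   lo = 0
--   hi = len(cubes) - 1
--   while lo < hi and cubes[lo] >= cubes[lo+1]:
--     lo += 1
--   while lo < hi and cubes[hi-1] <= cubes[hi]:
--     hi -= 1
--   return 'Yes' if lo == hi else 'No'
-- ===== SOURCE B (Python) =====
-- def solve(cubes):
--     # Single left-to-right pass: stackable iff no strict rise is ever followed by a strict fall.
--     seen_rise = False
--     for t in range(len(cubes) - 1):
--         if cubes[t] < cubes[t + 1]: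
--             seen_rise = True
--         elif cubes[t] > cubes[t + 1] and seen_rise:
--             return 'No'
--     return 'Yes'
-- ===== Notes on version B (the rewrite author's own statement) =====
-- stated objective: simpler
-- what changed: Replaced A's two boundary-pointer while-loops (advance lo over the non-increasing prefix, retreat hi over the non-decreasing suffix, compare) by a single left-to-right pass with a seen_rise flag that rejects exactly when a strict fall occurs after a strict rise.
-- intended difference: On the empty list A returns 'No' (its pointers start at 0 and -1 and never meet), while B returns 'Yes', which is intended since an empty sequence of cubes is trivially stackable. — e.g. on solve([]): A returns "No", B returns "Yes"
import Mathlib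
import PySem

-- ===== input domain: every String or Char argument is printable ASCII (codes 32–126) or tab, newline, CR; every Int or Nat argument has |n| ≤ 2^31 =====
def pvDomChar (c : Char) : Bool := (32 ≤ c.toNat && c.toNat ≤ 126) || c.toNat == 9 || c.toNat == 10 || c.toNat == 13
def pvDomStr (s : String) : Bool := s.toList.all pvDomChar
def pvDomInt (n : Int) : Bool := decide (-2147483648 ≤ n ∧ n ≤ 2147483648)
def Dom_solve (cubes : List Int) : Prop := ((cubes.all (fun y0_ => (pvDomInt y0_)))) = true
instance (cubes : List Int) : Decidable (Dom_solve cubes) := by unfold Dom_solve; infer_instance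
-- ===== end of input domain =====

-- B replaces A's two boundary-pointer scans by one flag-carrying left-to-right pass (simpler); on the
-- empty list A returns "No" and B the intended "Yes" (stated as D_solve below).

-- every index access in both programs is within range when evaluated (the loop guards ensure it),
-- so Python's cubes[i] is rendered exactly by pyGet? with a junk default that is never used
def pvGetI (c : List Int) (i : Int) : Int := (PySem.List.pyGet? c i).getD 0

-- ===== PORT A =====
-- while lo < hi and cubes[lo] >= cubes[lo+1]: lo += 1
def solveLoopLo (c : List Int) (lo hi : Int) : Int :=
  if lo < hi ∧ pvGetI c lo ≥ pvGetI c (lo + 1) then solveLoopLo c (lo + 1) hi else lo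
termination_by (hi - lo).toNat
decreasing_by omega

-- while lo < hi and cubes[hi-1] <= cubes[hi]: hi -= 1
def solveLoopHi (c : List Int) (lo hi : Int) : Int :=
  if lo < hi ∧ pvGetI c (hi - 1) ≤ pvGetI c hi then solveLoopHi c lo (hi - 1) else hi
termination_by (hi - lo).toNat
decreasing_by omega

def solve (cubes : List Int) : String :=
  let lo := solveLoopLo cubes 0 ((cubes.length : Int) - 1)
  let hi := solveLoopHi cubes lo ((cubes.length : Int) - 1)
  if lo = hi then "Yes" else "No"

-- ===== PORT B =====
-- for t in range(len(cubes)-1): …  with the seen_rise flag and an early 'No' return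
def solveAltLoop (c : List Int) (n t : Int) (seen : Bool) : String :=
  if t < n - 1 then
    if pvGetI c t < pvGetI c (t + 1) then solveAltLoop c n (t + 1) true
    else if pvGetI c t > pvGetI c (t + 1) ∧ seen then "No"
    else solveAltLoop c n (t + 1) seen
  else "Yes"
termination_by (n - 1 - t).toNat
decreasing_by all_goals omega

def solve_alt (cubes : List Int) : String :=
  solveAltLoop cubes (cubes.length : Int) 0 false

-- ===== PRECONDITION & SPEC =====
-- On the empty list A returns "No", while B returns "Yes", the intended answer: an empty pile of cubes is trivially stackable.
def D_solve (cubes : List Int) : Prop := cubes = []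
instance (cubes : List Int) : Decidable (D_solve cubes) := by unfold D_solve; infer_instance

def Spec_solve (cubes : List Int) (out : String) : Prop := ¬ D_solve cubes → out = solve_alt cubes
instance (cubes : List Int) (out : String) : Decidable (Spec_solve cubes out) := by unfold Spec_solve; infer_instance

def pvDiffWitness_solve : List Int := []
def pvDiffWitnessOut_solve : String × String := ("No", "Yes")

-- ===== CLAIM (what is proved, stated in full; the proofs are below) =====
def Claim_unchanged_solve : Prop := ∀ (cubes : List Int), Dom_solve cubes → Spec_solve cubes (solve cubes)
def Claim_changed_solve : Prop := Dom_solve (pvDiffWitness_solve) ∧ D_solve (pvDiffWitness_solve) ∧ solve (pvDiffWitness_solve) = pvDiffWitnessOut_solve.1 ∧ solve_alt (pvDiffWitness_solve) = pvDiffWitnessOut_solve.2 ∧ pvDiffWitnessOut_solve.1 ≠ pvDiffWitnessOut_solve.2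
def Claim_exact_solve : Prop := ∀ (cubes : List Int), Dom_solve cubes → D_solve cubes → solve cubes ≠ solve_alt cubes

-- ===== LEMMAS AND PROOFS =====

-- characterization of A's first loop: result r lies in [lo, max lo hi], the scanned prefix is
-- non-increasing, and the loop guard fails at r
theorem solveLoopLo_spec (c : List Int) (lo hi : Int) :
    lo ≤ solveLoopLo c lo hi ∧ solveLoopLo c lo hi ≤ max lo hi ∧
    (∀ t, lo ≤ t → t < solveLoopLo c lo hi → pvGetI c t ≥ pvGetI c (t + 1)) ∧
    ¬ (solveLoopLo c lo hi < hi ∧ pvGetI c (solveLoopLo c lo hi) ≥ pvGetI c (solveLoopLo c lo hi + 1)) := by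
  induction lo using solveLoopLo.induct c hi with
  | case1 lo h ih =>
    rw [solveLoopLo, if_pos h]
    obtain ⟨h1, h2, h3, h4⟩ := ih
    refine ⟨by omega, by omega, ?_, h4⟩
    intro t ht1 ht2
    rcases eq_or_lt_of_le ht1 with rfl | hlt
    · exact h.2
    · exact h3 t (by omega) ht2
  | case2 lo h =>
    rw [solveLoopLo, if_neg h]
    exact ⟨le_refl _, le_max_left _ _, fun t ht1 ht2 => absurd ht2 (by omega), h⟩

-- characterization of A's second loop: result r lies in [min lo hi, hi], the scanned suffix is
-- non-decreasing, and the loop guard fails at r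
theorem solveLoopHi_spec (c : List Int) (lo hi : Int) :
    min lo hi ≤ solveLoopHi c lo hi ∧ solveLoopHi c lo hi ≤ hi ∧
    (∀ t, solveLoopHi c lo hi < t → t ≤ hi → pvGetI c (t - 1) ≤ pvGetI c t) ∧
    ¬ (lo < solveLoopHi c lo hi ∧ pvGetI c (solveLoopHi c lo hi - 1) ≤ pvGetI c (solveLoopHi c lo hi)) := by
  induction hi using solveLoopHi.induct c lo with
  | case1 hi h ih =>
    rw [solveLoopHi, if_pos h]
    obtain ⟨h1, h2, h3, h4⟩ := ih
    refine ⟨by omega, by omega, ?_, h4⟩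
    intro t ht1 ht2
    rcases eq_or_lt_of_le ht2 with rfl | hlt
    · exact h.2
    · exact h3 t ht1 (by omega)
  | case2 hi h =>
    rw [solveLoopHi, if_neg h]
    exact ⟨min_le_right _ _, le_refl _, fun t ht1 ht2 => absurd ht1 (by omega), h⟩

-- characterization of B's loop: it answers "Yes" iff every strict fall in [t, n-1) has seen = false
-- and no strict rise strictly before it (within [t, fall))
theorem solveAltLoop_spec (c : List Int) (n t : Int) (seen : Bool) :
    solveAltLoop c n t seen = "Yes" ↔
      (∀ u, t ≤ u → u < n - 1 → pvGetI c u > pvGetI c (u + 1) →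
        (seen = false ∧ ∀ s, t ≤ s → s < u → ¬ pvGetI c s < pvGetI c (s + 1))) := by
  induction t, seen using solveAltLoop.induct c n with
  | case1 t seen h hrise ih =>
    rw [solveAltLoop, if_pos h, if_pos hrise]
    rw [ih]
    constructor
    · intro hyp u hu1 hu2 hfall
      rcases eq_or_lt_of_le hu1 with rfl | hlt
      · omega
      · have := hyp u (by omega) hu2 hfall
        exact absurd this.1 (by simp)
    · intro hyp u hu1 hu2 hfall
      have := hyp u (by omega) hu2 hfall
      exact absurd (this.2 t (le_refl _) (by omega)) (by simp [hrise])
  | case2 t seen h hrise hfall =>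
    rw [solveAltLoop, if_pos h, if_neg hrise, if_pos hfall]
    constructor
    · intro hyp; exact absurd hyp (by decide)
    · intro hyp
      have := hyp t (le_refl _) (by omega) hfall.1
      exact absurd this.1 (by simp [hfall.2])
  | case3 t seen h hrise hfall ih =>
    rw [solveAltLoop, if_pos h, if_neg hrise, if_neg hfall]
    rw [ih]
    constructor
    · intro hyp u hu1 hu2 hf
      rcases eq_or_lt_of_le hu1 with rfl | hlt
      · refine ⟨?_, fun s hs1 hs2 => by omega⟩
        cases seen with
        | false => rfl
        | true => exact absurd ⟨hf, rfl⟩ hfall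
      · obtain ⟨hseen, hnorise⟩ := hyp u (by omega) hu2 hf
        refine ⟨hseen, fun s hs1 hs2 hr => ?_⟩
        rcases eq_or_lt_of_le hs1 with rfl | hslt
        · exact hrise hr
        · exact hnorise s (by omega) hs2 hr
    · intro hyp u hu1 hu2 hf
      obtain ⟨hseen, hnorise⟩ := hyp u (by omega) hu2 hf
      exact ⟨hseen, fun s hs1 hs2 => hnorise s (by omega) hs2⟩
  | case4 t seen h =>
    rw [solveAltLoop, if_neg h]
    simp only [true_iff]
    intro u hu1 hu2; omega

theorem solveAltLoop_yes_or_no (c : List Int) (n t : Int) (seen : Bool) :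
    solveAltLoop c n t seen = "Yes" ∨ solveAltLoop c n t seen = "No" := by
  induction t, seen using solveAltLoop.induct c n with
  | case1 t seen h hrise ih => rw [solveAltLoop, if_pos h, if_pos hrise]; exact ih
  | case2 t seen h hrise hfall => rw [solveAltLoop, if_pos h, if_neg hrise, if_pos hfall]; right; rfl
  | case3 t seen h hrise hfall ih => rw [solveAltLoop, if_pos h, if_neg hrise, if_neg hfall]; exact ih
  | case4 t seen h => rw [solveAltLoop, if_neg h]; left; rfl

theorem solve_eq_alt_of_ne_nil (c : List Int) (hne : c ≠ []) : solve c = solve_alt c := by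
  have hn : (1 : Int) ≤ (c.length : Int) := by
    have : 0 < c.length := List.length_pos_iff.mpr hne
    omega
  unfold solve solve_alt
  set n : Int := (c.length : Int) with hn_def
  set lo := solveLoopLo c 0 (n - 1) with hlo_def
  obtain ⟨hlo1, hlo2, hlo3, hlo4⟩ := solveLoopLo_spec c 0 (n - 1)
  rw [← hlo_def] at hlo1 hlo2 hlo3 hlo4
  have hlo2' : lo ≤ n - 1 := by simp only [max_def] at hlo2; split at hlo2 <;> omega
  set hi := solveLoopHi c lo (n - 1) with hhi_def
  obtain ⟨hhi1, hhi2, hhi3, hhi4⟩ := solveLoopHi_spec c lo (n - 1)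
  rw [← hhi_def] at hhi1 hhi2 hhi3 hhi4
  have hhi1' : lo ≤ hi := by simp only [min_def] at hhi1; split at hhi1 <;> omega
  by_cases heq : lo = hi
  · rw [if_pos heq]
    have : solveAltLoop c n 0 false = "Yes" := by
      rw [solveAltLoop_spec]
      intro u hu1 hu2 hfall
      refine ⟨rfl, fun s hs1 hs2 hrise => ?_⟩
      -- u cannot be ≥ lo: the suffix after hi = lo is non-decreasing
      have hult : u < lo := by
        by_contra hge
        have := hhi3 (u + 1) (by omega) (by omega)
        simp only [add_sub_cancel_right] at this
        omega
      -- s < u < lo: the prefix before lo is non-increasing, contradicting the rise at s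
      have := hlo3 s (by omega) (by omega)
      omega
    rw [this]
  · rw [if_neg heq]
    have hlt : lo < hi := by omega
    -- the guard of A's second loop failed with lo < hi: strict fall at hi - 1
    have hfall : pvGetI c (hi - 1) > pvGetI c ((hi - 1) + 1) := by
      have h1 : (hi - 1) + 1 = hi := by omega
      rw [h1]
      omega
    -- the guard of A's first loop failed with lo < n - 1: strict rise at lo
    have hnlt : lo < n - 1 := by omega
    have hrise : pvGetI c lo < pvGetI c (lo + 1) := by omega
    have hlou : lo < hi - 1 := by
      rcases eq_or_lt_of_le (by omega : lo ≤ hi - 1) with heq1 | h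
      · exfalso
        rw [← heq1] at hfall
        omega
      · exact h
    have : solveAltLoop c n 0 false = "No" := by
      rcases solveAltLoop_yes_or_no c n 0 false with hyes | hno
      · exfalso
        rw [solveAltLoop_spec] at hyes
        exact (hyes (hi - 1) (by omega) (by omega) hfall).2 lo (by omega) hlou hrise
      · exact hno
    rw [this]

theorem solve_nil : solve [] = "No" := by
  rw [solve, solveLoopLo, solveLoopHi]
  norm_num

theorem solve_alt_nil : solve_alt [] = "Yes" := by
  rw [solve_alt, solveAltLoop]
  norm_num

-- ===== VERDICT (by name: the statement is the Claim_ definition above) =====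
theorem solve_spec : Claim_unchanged_solve := by
  intro cubes _ hD
  exact solve_eq_alt_of_ne_nil cubes hD

theorem solve_changed : Claim_changed_solve := by
  unfold Claim_changed_solve
  refine ⟨by decide, rfl, solve_nil, solve_alt_nil, by decide⟩

theorem solve_tight : Claim_exact_solve := by
  intro cubes _ hD
  rw [hD, solve_nil, solve_alt_nil]
  decide
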